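-- pv_equiv track=rewrite | github.com/tschuehly/SV-Fasanenhof | scripts/planning_doc_sync.py | leaf_keys
-- ===== SOURCE A (Python) =====
-- from dataclasses import dataclass, field
--
-- @dataclass
-- class Unit:
--     key: tuple[str, ...]
--     level: int
--     lines: list[str] = field(default_factory=list)
--
-- def leaf_keys(units: dict[tuple[str, ...], Unit]) -> list[tuple[str, ...]]:
--     keys = sorted(units.keys())
--     leafs: list[tuple[str, ...]] = []
--     for key in keys:
--         is_parent = any(other[: len(key)] == key and len(other) > len(key) for other in keys)
--         if not is_parent:
--             leafs.append(key)
--     return leafs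
-- ===== SOURCE B (Python) =====
-- def leaf_keys(units):
--     keys = sorted(units)
--     prefixes = set(k[:i] for k in keys for i in range(len(k)))
--     return [k for k in keys if k not in prefixes]
-- ===== Notes on version B (the rewrite author's own statement) =====
-- stated objective: faster
-- what changed: instead of scanning all keys for an extension of each key (quadratic in the number of keys), B builds one set of all proper prefixes of all keys and keeps the keys not in it
import Mathlib
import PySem

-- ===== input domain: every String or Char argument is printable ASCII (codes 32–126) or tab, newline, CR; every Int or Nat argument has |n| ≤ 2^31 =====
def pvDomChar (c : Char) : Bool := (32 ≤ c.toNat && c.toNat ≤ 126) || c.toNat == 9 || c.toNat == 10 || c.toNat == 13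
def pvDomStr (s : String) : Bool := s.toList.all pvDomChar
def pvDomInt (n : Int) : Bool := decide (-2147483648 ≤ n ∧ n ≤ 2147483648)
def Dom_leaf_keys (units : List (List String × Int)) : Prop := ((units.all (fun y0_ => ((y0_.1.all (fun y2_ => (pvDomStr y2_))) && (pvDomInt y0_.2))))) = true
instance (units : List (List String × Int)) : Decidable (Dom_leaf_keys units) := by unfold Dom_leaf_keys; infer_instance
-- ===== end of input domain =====

-- B replaces A's quadratic all-pairs prefix scan by one set of all proper prefixes of all keys (membership test per key); objective: faster.

-- ===== PORT A =====
def leaf_keys (units : List (List String × Int)) : List (List String) :=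
  let keys := PySem.List.sorted ((PySem.Dict.ofList units).keys) (fun k => k) false
  keys.foldl (fun leafs key =>
    let is_parent := keys.any (fun other =>
      (PySem.List.slice other none (some (key.length : Int)) == key) &&
        decide (other.length > key.length))
    if is_parent then leafs else leafs ++ [key]) []

-- ===== PORT B =====
def leaf_keys_alt (units : List (List String × Int)) : List (List String) :=
  let keys := PySem.List.sorted ((PySem.Dict.ofList units).keys) (fun k => k) false
  let prefixes : PySem.Set (List String) :=
    PySem.Set.ofList (keys.flatMap (fun k =>
      (PySem.List.pyRange 0 (k.length : Int) 1).map
        (fun i => PySem.List.slice k none (some i))))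
  keys.filter (fun k => !(PySem.Set.contains prefixes k))

-- ===== PRECONDITION & SPEC =====
def Spec_leaf_keys (units : List (List String × Int)) (out : List (List String)) : Prop := out = leaf_keys_alt units
instance (units : List (List String × Int)) (out : List (List String)) : Decidable (Spec_leaf_keys units out) := by unfold Spec_leaf_keys; infer_instance

-- ===== CLAIM (what is proved, stated in full; the proofs are below) =====
def Claim_equal_leaf_keys : Prop := ∀ (units : List (List String × Int)), Dom_leaf_keys units → Spec_leaf_keys units (leaf_keys units)

-- ===== LEMMAS AND PROOFS =====

-- A's per-key any-scan coincides with B's membership in the set of proper prefixes.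
theorem pv_any_eq_mem_prefixes (keys : List (List String)) (key : List String) :
    (keys.any (fun other =>
      (PySem.List.slice other none (some (key.length : Int)) == key) &&
        decide (other.length > key.length)))
    = (keys.flatMap (fun k =>
        (PySem.List.pyRange 0 (k.length : Int) 1).map
          (fun i => PySem.List.slice k none (some i)))).contains key := by
  rw [Bool.eq_iff_iff]
  simp only [List.any_eq_true, List.contains_eq_mem, List.mem_flatMap,
    List.mem_map, Bool.and_eq_true, beq_iff_eq, decide_eq_true_eq]
  constructor
  · rintro ⟨o, ho, hsl, hlen⟩
    refine ⟨o, ho, (key.length : Int), ?_, hsl⟩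
    rw [PySem.List.mem_pyRange_one]
    omega
  · rintro ⟨o, ho, i, hi, hsl⟩
    rw [PySem.List.mem_pyRange_one] at hi
    have h0 : (0:Int) ≤ i := hi.1
    rw [PySem.List.slice_to _ h0] at hsl
    have hlt : i.toNat < o.length := by omega
    have hlenk : key.length = i.toNat := by
      rw [← hsl]; simp [List.length_take]; omega
    refine ⟨o, ho, ?_, by omega⟩
    rw [PySem.List.slice_to _ (by positivity : (0:Int) ≤ (key.length : Int))]
    rw [show ((key.length : Int)).toNat = i.toNat from by omega]
    exact hsl

-- ===== VERDICT (by name: the statement is the Claim_ definition above) =====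
theorem leaf_keys_spec : Claim_equal_leaf_keys := by
  intro units _
  unfold Spec_leaf_keys leaf_keys leaf_keys_alt
  set keys := PySem.List.sorted ((PySem.Dict.ofList units).keys) (fun k => k) false with hk
  have hstep : ∀ (acc : List (List String)) (key : List String),
      (if keys.any (fun other =>
          (PySem.List.slice other none (some (key.length : Int)) == key) &&
            decide (other.length > key.length)) then acc else acc ++ [key])
      = (if (!(PySem.Set.contains (PySem.Set.ofList (keys.flatMap (fun k =>
            (PySem.List.pyRange 0 (k.length : Int) 1).map
              (fun i => PySem.List.slice k none (some i))))) key)) then acc ++ [key] else acc) := by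
    intro acc key
    rw [show PySem.Set.contains (PySem.Set.ofList (keys.flatMap (fun k =>
            (PySem.List.pyRange 0 (k.length : Int) 1).map
              (fun i => PySem.List.slice k none (some i)))) ) key
        = (keys.flatMap (fun k =>
            (PySem.List.pyRange 0 (k.length : Int) 1).map
              (fun i => PySem.List.slice k none (some i)))).contains key from by
          simp [PySem.Set.mem_ofList, List.contains_eq_mem],
      ← pv_any_eq_mem_prefixes keys key]
    cases h : keys.any (fun other =>
      (PySem.List.slice other none (some (key.length : Int)) == key) &&
        decide (other.length > key.length)) <;> simp
  calc keys.foldl (fun leafs key =>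
        if keys.any (fun other =>
          (PySem.List.slice other none (some (key.length : Int)) == key) &&
            decide (other.length > key.length)) then leafs else leafs ++ [key]) []
      = keys.foldl (fun leafs key =>
          if (!(PySem.Set.contains (PySem.Set.ofList (keys.flatMap (fun k =>
            (PySem.List.pyRange 0 (k.length : Int) 1).map
              (fun i => PySem.List.slice k none (some i))))) key)) then leafs ++ [key] else leafs) [] := by
        exact PySem.List.foldl_congr_mem _ _ _ _ (by intro acc key _; exact hstep acc key)
    _ = keys.filter (fun k => !(PySem.Set.contains (PySem.Set.ofList (keys.flatMap (fun k =>
            (PySem.List.pyRange 0 (k.length : Int) 1).map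
              (fun i => PySem.List.slice k none (some i))))) k)) := by
        rw [PySem.List.foldl_append_if_eq_filter]; simp
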